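-- pv_equiv track=rewrite | github.com/IU-Capstone-Project-2024/Alumni | alumni/events/services.py | get_recommended_events
-- ===== SOURCE A (Python) =====
-- def get_recommended_events(events, interests):
--     """
--     Selects events suitable for the user based on their interests.
--
--     Args:
--     events (QuerySet): QuerySet of Events objects to filter from.
--     interests (list of str): List of interests of the user.
--
--     Returns:
--     list: Array of event IDs recommended for the user.
--     """
--     # TODO: Write finding suitable events. Add parameters if needed.
--     interests_set = set(interests)
--     scored_events = []
--
--     for event_id, tags in events:
--         tags_set = set(tags)
--         common_tags = interests_set & tags_set
--         score = len(common_tags)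
--         scored_events.append((event_id, score))
--
--     sorted_events = sorted(scored_events, key=lambda x: x[1], reverse=True)
--
--     sorted_event_ids = [event_id for event_id, _ in sorted_events]
--     return sorted_event_ids
-- ===== SOURCE B (Python) =====
-- def get_recommended_events(events, interests):
--     """Counting-sort variant: bucket event ids by score, then read buckets
--     from highest score down (stable, matches sorted(..., reverse=True))."""
--     interests_set = set(interests)
--     buckets = [[] for _ in range(len(interests_set) + 1)]
--     for event_id, tags in events:
--         score = len(interests_set & set(tags))
--         buckets[score].append(event_id)
--     result = []
--     for bucket in reversed(buckets):
--         result += bucket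
--     return result
-- ===== Notes on version B (the rewrite author's own statement) =====
-- stated objective: alternative
-- what changed: Replaces sorted(..., key=score, reverse=True) with a counting sort: event ids are appended into score-indexed buckets in input order and the buckets are concatenated from highest score down, reproducing the stable descending order.
import Mathlib
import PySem

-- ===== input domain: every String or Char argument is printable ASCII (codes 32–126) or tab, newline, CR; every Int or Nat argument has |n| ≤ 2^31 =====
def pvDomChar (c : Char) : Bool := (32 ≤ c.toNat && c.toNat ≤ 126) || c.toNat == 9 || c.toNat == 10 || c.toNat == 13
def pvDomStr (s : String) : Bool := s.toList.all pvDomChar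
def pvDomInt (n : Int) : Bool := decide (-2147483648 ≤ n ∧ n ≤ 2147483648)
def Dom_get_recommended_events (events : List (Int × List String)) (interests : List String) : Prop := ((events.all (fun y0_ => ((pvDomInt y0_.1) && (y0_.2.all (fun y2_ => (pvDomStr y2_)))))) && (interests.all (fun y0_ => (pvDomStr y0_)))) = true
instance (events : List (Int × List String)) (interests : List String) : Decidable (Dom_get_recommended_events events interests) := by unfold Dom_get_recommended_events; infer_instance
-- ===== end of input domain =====

-- B replaces the key-based descending sort with a stable counting sort over score buckets (alternative decomposition, same results).


-- ===== PORT A =====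
def get_recommended_events (events : List (Int × List String)) (interests : List String) : List Int :=
  let interests_set : PySem.Set String := PySem.Set.ofList interests
  let scored_events : List (Int × Int) :=
    events.foldl (fun acc ev =>
      let tags_set : PySem.Set String := PySem.Set.ofList ev.2
      let common_tags := PySem.Set.inter interests_set tags_set
      let score := PySem.Set.len common_tags
      acc ++ [(ev.1, score)]) []
  let sorted_events := PySem.List.sorted scored_events (fun x => x.2) true
  sorted_events.map (fun x => x.1)

-- ===== PORT B =====
def get_recommended_events_alt (events : List (Int × List String)) (interests : List String) : List Int :=
  let interests_set : PySem.Set String := PySem.Set.ofList interests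
  let buckets0 : List (List Int) := List.replicate (interests_set.length + 1) []
  let buckets := events.foldl (fun bs ev =>
      let score := PySem.Set.len (PySem.Set.inter interests_set (PySem.Set.ofList ev.2))
      PySem.List.pySetD bs score (PySem.List.pyGetD bs score [] ++ [ev.1])) buckets0
  buckets.reverse.foldl (fun acc b => acc ++ b) []

-- ===== PRECONDITION & SPEC =====
def Spec_get_recommended_events (events : List (Int × List String)) (interests : List String) (out : List Int) : Prop := out = get_recommended_events_alt events interests
instance (events : List (Int × List String)) (interests : List String) (out : List Int) : Decidable (Spec_get_recommended_events events interests out) := by unfold Spec_get_recommended_events; infer_instance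

-- ===== CLAIM (what is proved, stated in full; the proofs are below) =====
def Claim_equal_get_recommended_events : Prop := ∀ (events : List (Int × List String)) (interests : List String), Dom_get_recommended_events events interests → Spec_get_recommended_events events interests (get_recommended_events events interests)

-- ===== LEMMAS AND PROOFS =====

-- inserting past a prefix none of whose elements x goes before
theorem insertBy_append_not {α : Type} (before : α → α → Bool) (x : α) (L r : List α)
    (h : ∀ y ∈ L, before x y = false) :
    PySem.List.insertBy before x (L ++ r) = L ++ PySem.List.insertBy before x r := by
  induction L with
  | nil => rfl
  | cons a L ih =>
    simp only [List.cons_append, PySem.List.insertBy, h a (by simp)]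
    simpa using ih (fun y hy => h y (by simp [hy]))

-- inserting one element into the descending bucket concatenation
theorem insert_desc_flatMap {α : Type} (key : α → Int) (x : α) (ks : List Int) (xs : List α)
    (hks : ks.Pairwise (· > ·)) (hmem : key x ∈ ks) :
    PySem.List.insertBy (fun a b => decide (key b < key a)) x
        (ks.flatMap (fun k => xs.filter (fun y => key y == k)))
      = ks.flatMap (fun k => (xs ++ [x]).filter (fun y => key y == k)) := by
  induction ks with
  | nil => cases hmem
  | cons k ks ih =>
    have hgt : ∀ k' ∈ ks, k > k' := (List.pairwise_cons.mp hks).1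
    by_cases hk : key x = k
    · -- x lands right after this bucket, before every later one
      have hnot : ∀ y ∈ xs.filter (fun y => key y == k), (fun a b => decide (key b < key a)) x y = false := by
        intro y hy
        have := (List.mem_filter.mp hy).2
        simp only [beq_iff_eq] at this
        simp [this, hk]
      simp only [List.flatMap_cons]
      rw [insertBy_append_not _ _ _ _ hnot]
      have hrest : PySem.List.insertBy (fun a b => decide (key b < key a)) x
          (ks.flatMap (fun k => xs.filter (fun y => key y == k)))
          = x :: ks.flatMap (fun k => xs.filter (fun y => key y == k)) := by
        cases hr : ks.flatMap (fun k => xs.filter (fun y => key y == k)) with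
        | nil => rfl
        | cons h t =>
          have hh : h ∈ ks.flatMap (fun k => xs.filter (fun y => key y == k)) := by
            rw [hr]; exact List.mem_cons_self
          obtain ⟨k', hk', hf⟩ := List.mem_flatMap.mp hh
          have : key h = k' := by simpa using (List.mem_filter.mp hf).2
          have : key h < key x := by rw [this, hk]; exact hgt k' hk'
          simp [PySem.List.insertBy, this]
      rw [hrest]
      have hlater : ∀ k' ∈ ks, (xs ++ [x]).filter (fun y => key y == k') = xs.filter (fun y => key y == k') := by
        intro k' hk'
        have : ¬ (key x = k') := by have := hgt k' hk'; omega
        simp [List.filter_append, this]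
      have hhere : (xs ++ [x]).filter (fun y => key y == k) = xs.filter (fun y => key y == k) ++ [x] := by
        simp [List.filter_append, hk]
      rw [hhere, List.flatMap_congr hlater]
      simp
    · -- skip this bucket entirely
      have hmem' : key x ∈ ks := by cases hmem with
        | head => exact absurd rfl hk
        | tail _ h => exact h
      have hkx : key x < k := hgt _ hmem'
      have hnot : ∀ y ∈ xs.filter (fun y => key y == k), (fun a b => decide (key b < key a)) x y = false := by
        intro y hy
        have := (List.mem_filter.mp hy).2
        simp only [beq_iff_eq] at this
        simp [this]; omega
      simp only [List.flatMap_cons]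
      rw [insertBy_append_not _ _ _ _ hnot, ih hks.of_cons hmem']
      have : (xs ++ [x]).filter (fun y => key y == k) = xs.filter (fun y => key y == k) := by
        simp [List.filter_append, hk]
      rw [this]

-- stable descending sort is the descending bucket concatenation
theorem sorted_rev_eq_flatMap {α : Type} (key : α → Int) (ks : List Int) (xs : List α)
    (hks : ks.Pairwise (· > ·)) (hx : ∀ x ∈ xs, key x ∈ ks) :
    PySem.List.sorted xs key true = ks.flatMap (fun k => xs.filter (fun y => key y == k)) := by
  induction xs using List.reverseRecOn with
  | nil => simp [PySem.List.sorted]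
  | append_singleton xs x ih =>
    rw [PySem.List.sorted_rev_eq_foldl_insertBy, List.foldl_append,
        ← PySem.List.sorted_rev_eq_foldl_insertBy]
    simp only [List.foldl_cons, List.foldl_nil]
    rw [ih (fun y hy => hx y (by simp [hy]))]
    exact insert_desc_flatMap key x ks xs hks (hx x (by simp))

-- the bucket-filling fold, characterised bucket by bucket
theorem foldl_buckets {β : Type} (g : β → Int) (fid : β → Int) (L : List β) (bs : List (List Int))
    (h : ∀ e ∈ L, 0 ≤ g e ∧ g e < bs.length) :
    L.foldl (fun bs e => PySem.List.pySetD bs (g e) (PySem.List.pyGetD bs (g e) [] ++ [fid e])) bs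
      = (List.range bs.length).map (fun k => bs.getD k [] ++ (L.filter (fun e => g e == (k : Int))).map fid) := by
  induction L generalizing bs with
  | nil =>
    simp only [List.foldl_nil, List.filter_nil, List.map_nil, List.append_nil]
    apply List.ext_getElem (by simp)
    intro i h1 h2
    simp [List.getD_eq_getElem?_getD, List.getElem?_eq_getElem (by simpa using h2)]
  | cons e L ih =>
    obtain ⟨h0, hlt⟩ := h e List.mem_cons_self
    set n := (g e).toNat with hn
    have hnlt : n < bs.length := by omega
    have hcast : g e = (n : Int) := by omega
    have hset : PySem.List.pySetD bs (g e) (PySem.List.pyGetD bs (g e) [] ++ [fid e])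
        = bs.set n (bs.getD n [] ++ [fid e]) := by
      rw [PySem.List.pySetD_of_nonneg _ _ h0, PySem.List.pyGetD_of_nonneg _ _ h0]
    simp only [List.foldl_cons]
    rw [hset, ih _ (by intro e' he'; have := h e' (List.mem_cons_of_mem _ he'); simpa using this)]
    simp only [List.length_set]
    apply List.map_congr_left
    intro k hk
    have hk' : k < bs.length := List.mem_range.mp hk
    have hgetset : (bs.set n (bs.getD n [] ++ [fid e])).getD k []
        = if k = n then bs.getD n [] ++ [fid e] else bs.getD k [] := by
      by_cases hkn : k = n
      · subst hkn
        simp [List.getD_eq_getElem?_getD, List.getElem?_set_self (by omega)]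
      · simp [List.getD_eq_getElem?_getD, List.getElem?_set_ne (Ne.symm hkn), hkn]
    rw [hgetset]
    by_cases hkn : k = n
    · subst hkn
      simp [hcast]
    · have hne : (g e == (k : Int)) = false := by simp [hcast]; omega
      simp [hne, hkn]

-- score of one event (proof abbreviation; both ports compute this expression inline)
def sc (iset : PySem.Set String) (ev : Int × List String) : Int :=
  PySem.Set.len (PySem.Set.inter iset (PySem.Set.ofList ev.2))


theorem main_eq (events : List (Int × List String)) (interests : List String) :
    (let interests_set : PySem.Set String := PySem.Set.ofList interests
     let scored_events : List (Int × Int) :=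
       events.foldl (fun acc ev =>
         let tags_set : PySem.Set String := PySem.Set.ofList ev.2
         let common_tags := PySem.Set.inter interests_set tags_set
         let score := PySem.Set.len common_tags
         acc ++ [(ev.1, score)]) []
     let sorted_events := PySem.List.sorted scored_events (fun x => x.2) true
     sorted_events.map (fun x => x.1))
    =
    (let interests_set : PySem.Set String := PySem.Set.ofList interests
     let buckets0 : List (List Int) := List.replicate (interests_set.length + 1) []
     let buckets := events.foldl (fun bs ev =>
         let score := PySem.Set.len (PySem.Set.inter interests_set (PySem.Set.ofList ev.2))
         PySem.List.pySetD bs score (PySem.List.pyGetD bs score [] ++ [ev.1])) buckets0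
     buckets.reverse.foldl (fun acc b => acc ++ b) []) := by
  dsimp only
  set iset := PySem.Set.ofList interests with hiset
  set m := iset.length with hm
  have hscb : ∀ ev : Int × List String, 0 ≤ sc iset ev ∧ sc iset ev < ((m + 1 : Nat) : Int) := by
    intro ev
    constructor
    · exact Int.natCast_nonneg _
    · have : (PySem.Set.inter iset (PySem.Set.ofList ev.2)).length ≤ m := by
        rw [hm]; exact List.length_filter_le _ _
      simp only [sc, PySem.Set.len]
      omega
  -- A side
  have hfA : (fun (acc : List (Int × Int)) (ev : Int × List String) => acc ++ [(ev.1, (PySem.Set.inter iset (PySem.Set.ofList ev.2)).len)]) = fun acc ev => acc ++ [(ev.1, sc iset ev)] := rfl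
  rw [hfA, PySem.List.foldl_append_singleton_eq_map (f := fun ev => (ev.1, sc iset ev))]
  simp only [List.nil_append]
  set ks : List Int := List.map (fun k : Nat => (k : Int)) ((List.range (m+1)).reverse) with hks
  have hpair : ks.Pairwise (· > ·) := by
    rw [hks, List.pairwise_map, List.pairwise_reverse]
    simpa using List.pairwise_lt_range
  have hmemks : ∀ x ∈ events.map (fun ev => (ev.1, sc iset ev)), (fun (x : Int × Int) => x.2) x ∈ ks := by
    intro x hx
    obtain ⟨ev, _, rfl⟩ := List.mem_map.mp hx
    obtain ⟨h1, h2⟩ := hscb ev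
    rw [hks]
    simp only [List.mem_map, List.mem_reverse, List.mem_range]
    exact ⟨(sc iset ev).toNat, by omega, by omega⟩
  rw [sorted_rev_eq_flatMap (fun x : Int × Int => x.2) ks (events.map fun ev => (ev.1, sc iset ev)) hpair hmemks]
  -- B side
  have hfB : (fun (bs : List (List Int)) (ev : Int × List String) => PySem.List.pySetD bs ((PySem.Set.inter iset (PySem.Set.ofList ev.2)).len) (PySem.List.pyGetD bs ((PySem.Set.inter iset (PySem.Set.ofList ev.2)).len) [] ++ [ev.1])) = fun bs ev => PySem.List.pySetD bs (sc iset ev) (PySem.List.pyGetD bs (sc iset ev) [] ++ [ev.1]) := rfl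
  rw [hfB, foldl_buckets (g := sc iset) (fid := fun ev => ev.1) events _ (by intro e _; simpa using hscb e)]
  simp only [List.length_replicate]
  rw [PySem.List.foldl_append_eq_flatten]
  simp only [List.nil_append]
  -- normalise both to flatMap over (range (m+1)).reverse
  rw [hks, List.map_flatMap, List.flatMap_map]
  rw [← List.map_reverse, ← List.flatMap_def]
  apply List.flatMap_congr
  intro a ha
  simp [List.filter_map, List.map_map, Function.comp_def, List.getD_eq_getElem?_getD, List.getElem?_replicate]
  split_ifs <;> rfl

-- ===== VERDICT (by name: the statement is the Claim_ definition above) =====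
theorem get_recommended_events_spec : Claim_equal_get_recommended_events := by
  intro events interests _
  unfold Spec_get_recommended_events get_recommended_events get_recommended_events_alt
  exact main_eq events interests
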